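-- pv_equiv track=rewrite | github.com/AliveTeam/alive_reversing | Scripts/refactor.py | extractHexOrDecString
-- ===== SOURCE A (Python) =====
-- def extractHexOrDecString(line):
--     ret = ""
--
--     hexStrRemoved = False
--     if line.startswith("0x"):
--         line = line[2:]
--         hexStrRemoved = True
--
--     for c in line:
--         if c.isspace():
--             continue
--         elif c in ['0', '1', '2', '3', '4', '5', '6', '7', '8', '9']:
--             ret = ret + c
--         elif c in ['A', 'B', 'C', 'D', 'E', 'F']:
--             ret = ret + c
--         else:
--             break
--
--     if hexStrRemoved:
--         ret = "0x" + ret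
--     return ret
-- ===== SOURCE B (Python) =====
-- import re
--
-- def extractHexOrDecString(line):
--     prefix = ""
--     if line.startswith("0x"):
--         prefix, line = "0x", line[2:]
--     # maximal leading run over the alphabet {hex digits} union {whitespace} ...
--     run = re.match(r'[0-9A-F\s]*', line).group()
--     # ... then delete the whitespace from that run
--     return prefix + re.sub(r'\s+', '', run)
-- ===== Notes on version B (the rewrite author's own statement) =====
-- stated objective: alternative
-- what changed: B replaces A's stateful skip/accumulate/break character loop with two declarative regex passes over an extended alphabet: it takes the maximal leading run matching [0-9A-F\s]* and then deletes the whitespace from that run, instead of skipping whitespace while accumulating digits.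
import Mathlib
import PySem

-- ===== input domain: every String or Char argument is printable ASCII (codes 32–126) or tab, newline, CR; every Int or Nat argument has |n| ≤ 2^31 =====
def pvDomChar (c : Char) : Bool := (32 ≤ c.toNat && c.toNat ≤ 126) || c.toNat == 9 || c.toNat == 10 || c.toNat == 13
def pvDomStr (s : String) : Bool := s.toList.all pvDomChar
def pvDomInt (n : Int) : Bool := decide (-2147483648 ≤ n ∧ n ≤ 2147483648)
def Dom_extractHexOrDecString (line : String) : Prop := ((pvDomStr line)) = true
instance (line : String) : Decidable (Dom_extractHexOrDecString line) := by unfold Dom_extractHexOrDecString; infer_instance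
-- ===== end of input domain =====

-- B replaces A's skip/accumulate/break loop with two regex passes: match the maximal leading run over [0-9A-F\s], then delete whitespace from it; same cost, different decomposition.


-- ===== PORT A =====
-- the for-loop of A: skip whitespace, append digits/A–F to ret, break otherwise
def extractA_loop : List Char → List Char → List Char
  | [], ret => ret
  | c :: cs, ret =>
    if PySem.Chars.isspace c then extractA_loop cs ret
    else if (['0','1','2','3','4','5','6','7','8','9'] : List Char).contains c then
      extractA_loop cs (ret ++ [c])
    else if (['A','B','C','D','E','F'] : List Char).contains c then
      extractA_loop cs (ret ++ [c])
    else ret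

def extractHexOrDecString (line : String) : String :=
  let cs := line.toList
  let p := if PySem.Chars.startswith cs ['0','x'] then
             (PySem.Chars.slice cs (some 2) none, true)
           else (cs, false)
  let ret := extractA_loop p.1 []
  String.mk (if p.2 then '0' :: 'x' :: ret else ret)

-- ===== PORT B =====
-- re.match(r'[0-9A-F\s]*', s).group() = maximal leading run over hex digits and whitespace
-- (\s ported as Python's isspace; exact on the printable-ASCII + tab/newline/CR domain);
-- re.sub(r'\s+', '', run) = drop every whitespace character of the run.
def extractHexOrDecString_alt (line : String) : String :=
  let cs := line.toList
  let p := if PySem.Chars.startswith cs ['0','x'] then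
             ((['0','x'] : List Char), PySem.Chars.slice cs (some 2) none)
           else ([], cs)
  let run := p.2.takeWhile (fun c =>
    (['0','1','2','3','4','5','6','7','8','9','A','B','C','D','E','F'] : List Char).contains c
      || PySem.Chars.isspace c)
  String.mk (p.1 ++ run.filter (fun c => !PySem.Chars.isspace c))

-- ===== PRECONDITION & SPEC =====
def Spec_extractHexOrDecString (line : String) (out : String) : Prop := out = extractHexOrDecString_alt line
instance (line : String) (out : String) : Decidable (Spec_extractHexOrDecString line out) := by unfold Spec_extractHexOrDecString; infer_instance

-- ===== CLAIM (what is proved, stated in full; the proofs are below) =====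
def Claim_equal_extractHexOrDecString : Prop := ∀ (line : String), Dom_extractHexOrDecString line → Spec_extractHexOrDecString line (extractHexOrDecString line)

-- ===== LEMMAS AND PROOFS =====
lemma hex_cond (c : Char) :
    (['0','1','2','3','4','5','6','7','8','9','A','B','C','D','E','F'] : List Char).contains c
    = ((['0','1','2','3','4','5','6','7','8','9'] : List Char).contains c
        || (['A','B','C','D','E','F'] : List Char).contains c) := by
  rw [show (['0','1','2','3','4','5','6','7','8','9','A','B','C','D','E','F'] : List Char)
        = ['0','1','2','3','4','5','6','7','8','9'] ++ ['A','B','C','D','E','F'] from rfl]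
  exact List.contains_append

lemma extractA_loop_eq (cs ret : List Char) :
    extractA_loop cs ret
      = ret ++ (cs.takeWhile (fun c =>
          (['0','1','2','3','4','5','6','7','8','9','A','B','C','D','E','F'] : List Char).contains c
            || PySem.Chars.isspace c)).filter (fun c => !PySem.Chars.isspace c) := by
  induction cs generalizing ret with
  | nil => simp [extractA_loop]
  | cons c cs ih =>
    rw [List.takeWhile_cons, hex_cond]
    by_cases hs : PySem.Chars.isspace c = true
    · rw [extractA_loop, if_pos hs, ih, hs, Bool.or_true, if_pos rfl, List.filter_cons]
      simp [hs]
    · have hs2 : PySem.Chars.isspace c = false := by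
        revert hs; cases PySem.Chars.isspace c <;> simp
      by_cases hd : ((['0','1','2','3','4','5','6','7','8','9'] : List Char).contains c) = true
      · rw [extractA_loop, if_neg hs, if_pos hd, ih, hd, Bool.true_or, Bool.true_or,
          if_pos rfl, List.filter_cons]
        simp [hs2]
      · by_cases hf : ((['A','B','C','D','E','F'] : List Char).contains c) = true
        · rw [extractA_loop, if_neg hs, if_neg hd, if_pos hf, ih, hf, Bool.or_true, Bool.true_or,
            if_pos rfl, List.filter_cons]
          simp [hs2]
        · have hd2 : (['0','1','2','3','4','5','6','7','8','9'] : List Char).contains c = false := by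
            revert hd; cases (['0','1','2','3','4','5','6','7','8','9'] : List Char).contains c <;> simp
          have hf2 : (['A','B','C','D','E','F'] : List Char).contains c = false := by
            revert hf; cases (['A','B','C','D','E','F'] : List Char).contains c <;> simp
          rw [extractA_loop, if_neg hs, if_neg hd, if_neg hf, hd2, hf2, hs2]
          simp

-- ===== VERDICT (by name: the statement is the Claim_ definition above) =====
theorem extractHexOrDecString_spec : Claim_equal_extractHexOrDecString := by
  intro line _
  unfold Spec_extractHexOrDecString extractHexOrDecString extractHexOrDecString_alt
  by_cases h : PySem.Chars.startswith line.toList ['0','x'] = true <;>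
    simp [h, extractA_loop_eq]
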